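-- pv_equiv track=rewrite | github.com/KerimovEmil/ProjectEuler | solutions/PE486.py | gen_strings
-- ===== SOURCE A (Python) =====
-- def yield_all_binary(n):
--     if n > 0:
--         for i in range(2 ** n):
--             yield bin(i)[2:].rjust(n, '0')
--     else:
--         yield ''
--
-- def gen_strings(n=6):
--     options = set()
--     for i in range(5, n + 1):
--         for x in gen_palindrome(i):
--             options.add(x)
--             num_free = n - i
--             for num_prefix in range(0, num_free+1):
--                 for num_suffix in range(num_free - num_prefix + 1):
--                     for prefix in yield_all_binary(num_prefix):
--                         for suffix in yield_all_binary(num_suffix):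
--                             options.add(prefix + x + suffix)
--     return options
--
-- def gen_palindrome(n):
--     num_fixed = n // 2
--     num_free = (n + 1) // 2
--
--     free_options = yield_all_binary(num_free)
--     for x in free_options:
--         yield x + x[:num_fixed][::-1]
-- ===== SOURCE B (Python) =====
-- def _all_bin(n):
--     # all binary strings of length n, in lexicographic order ([''] when n <= 0)
--     if n <= 0:
--         return ['']
--     return [c + s for c in '01' for s in _all_bin(n - 1)]
--
-- def _pals(n):
--     # all binary palindromes of length n, built by recursive wrapping, lexicographic order
--     if n <= 0:
--         return ['']
--     if n == 1:
--         return ['0', '1']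
--     return [c + p + c for c in '01' for p in _pals(n - 2)]
--
-- def gen_strings(n=6):
--     return {p + x + s
--             for i in range(5, n + 1)
--             for x in _pals(i)
--             for pl in range(n - i + 1)
--             for sl in range(n - i - pl + 1)
--             for p in _all_bin(pl)
--             for s in _all_bin(sl)}
-- ===== Notes on version B (the rewrite author's own statement) =====
-- stated objective: simpler
-- what changed: B is a single set comprehension that builds palindromes by recursive wrapping (c+p+c) and binary pad strings by structural recursion, instead of A's bin(i)[2:].rjust numeric formatting, mirror-completion of enumerated half-strings, and the redundant separate add of the bare palindrome.
import Mathlib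
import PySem

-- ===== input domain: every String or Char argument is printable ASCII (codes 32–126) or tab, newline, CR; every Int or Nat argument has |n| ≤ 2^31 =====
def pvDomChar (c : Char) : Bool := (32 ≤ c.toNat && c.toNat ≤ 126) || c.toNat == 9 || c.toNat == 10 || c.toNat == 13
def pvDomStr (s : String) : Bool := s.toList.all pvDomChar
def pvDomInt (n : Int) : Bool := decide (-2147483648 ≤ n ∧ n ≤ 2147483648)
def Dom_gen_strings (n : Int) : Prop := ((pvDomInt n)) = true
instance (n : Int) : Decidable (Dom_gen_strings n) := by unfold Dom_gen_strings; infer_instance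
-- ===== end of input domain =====

-- B replaces A's bin()/rjust numeric formatting and mirror-completed palindrome halves (plus the
-- redundant separate add of the bare palindrome) by one set comprehension over recursively
-- generated binary strings and wrap-recursive palindromes; objective: simpler, same result set.

-- ===== PORT A =====

/-- `s.rjust(w, '0')`: left-pad with `'0'` to width `w` (no-op when already long enough); exact
hand port (strings as `List Char`). -/
def pvRjust0 (cs : List Char) (w : Nat) : List Char := List.replicate (w - cs.length) '0' ++ cs

/-- `yield_all_binary(n)`: the list of yielded strings, `bin(i)[2:].rjust(n, '0')`
(`bin` is `PySem.Int.toBinChars0b`; `n.toNat` is exact under the `n > 0` guard). -/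
def yield_all_binary (n : Int) : List (List Char) :=
  if n > 0 then
    (PySem.List.pyRange 0 (2 ^ n.toNat) 1).map
      (fun i => pvRjust0 (PySem.List.slice (PySem.Int.toBinChars0b i) (some 2) none) n.toNat)
  else [[]]

/-- `gen_palindrome(n)`: the list of yielded strings; `x[:num_fixed][::-1]` ported as `.reverse`
of the slice (`[::-1]` is reverse: `PySem.List.slice?_none_none_neg_one`). -/
def gen_palindrome (nn : Int) : List (List Char) :=
  let num_fixed := PySem.Int.floordiv nn 2
  let num_free := PySem.Int.floordiv (nn + 1) 2
  (yield_all_binary num_free).map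
    (fun x => x ++ (PySem.List.slice x none (some num_fixed)).reverse)

/-- Port of A: the set `options` built by `Set.add` in first-insertion order; strings kept as
`List Char` throughout and converted by `String.ofList` at the end. -/
def gen_strings (n : Int) : List String :=
  let options : PySem.Set (List Char) :=
    (PySem.List.pyRange 5 (n + 1) 1).foldl (fun options i =>
      (gen_palindrome i).foldl (fun options x =>
        let options := PySem.Set.add options x
        let num_free := n - i
        (PySem.List.pyRange 0 (num_free + 1) 1).foldl (fun options num_prefix =>
          (PySem.List.pyRange 0 (num_free - num_prefix + 1) 1).foldl (fun options num_suffix =>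
            (yield_all_binary num_prefix).foldl (fun options pre =>
              (yield_all_binary num_suffix).foldl (fun options suf =>
                PySem.Set.add options (pre ++ x ++ suf)) options) options) options) options) options)
      PySem.Set.empty
  options.map (fun cs => String.ofList cs)

-- ===== PORT B =====

/-- `_all_bin(n)`: all binary strings of length `n` by structural recursion. -/
def all_bin (n : Int) : List (List Char) :=
  if n ≤ 0 then [[]]
  else (['0', '1']).flatMap (fun c => (all_bin (n - 1)).map (fun s => c :: s))
termination_by n.toNat
decreasing_by omega

/-- `_pals(n)`: all binary palindromes of length `n` by recursive wrapping `c + p + c`. -/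
def pals (n : Int) : List (List Char) :=
  if n ≤ 0 then [[]]
  else if n = 1 then [['0'], ['1']]
  else (['0', '1']).flatMap (fun c => (pals (n - 2)).map (fun p => (c :: p) ++ [c]))
termination_by n.toNat
decreasing_by omega

/-- Port of B: the one set comprehension = `Set.ofList` of the nested generator list. -/
def gen_strings_alt (n : Int) : List String :=
  (PySem.Set.ofList (
    (PySem.List.pyRange 5 (n + 1) 1).flatMap (fun i =>
      (pals i).flatMap (fun x =>
        (PySem.List.pyRange 0 (n - i + 1) 1).flatMap (fun pl =>
          (PySem.List.pyRange 0 (n - i - pl + 1) 1).flatMap (fun sl =>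
            (all_bin pl).flatMap (fun p =>
              (all_bin sl).map (fun s => p ++ x ++ s)))))))).map (fun cs => String.ofList cs)

-- ===== PRECONDITION & SPEC =====
def Spec_gen_strings (n : Int) (out : List String) : Prop := out = gen_strings_alt n
instance (n : Int) (out : List String) : Decidable (Spec_gen_strings n out) := by unfold Spec_gen_strings; infer_instance

-- ===== CLAIM (what is proved, stated in full; the proofs are below) =====
def Claim_equal_gen_strings : Prop := ∀ (n : Int), Dom_gen_strings n → Spec_gen_strings n (gen_strings n)

-- ===== LEMMAS AND PROOFS =====

/-- The digit list `bin(j)[2:]` computes for `j > 0` (no `'0'` special case yet). -/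
def goBin : Nat → List Char
  | 0 => []
  | (m + 1) => goBin ((m + 1) / 2) ++ [Nat.digitChar ((m + 1) % 2)]
decreasing_by exact Nat.div_lt_self (Nat.succ_pos m) (by omega)

theorem goBin_pos (j : Nat) (h : 0 < j) :
    goBin j = goBin (j / 2) ++ [Nat.digitChar (j % 2)] := by
  cases j with
  | zero => omega
  | succ m => rw [goBin]

theorem toDigitsCore_eq (fuel : Nat) : ∀ (j : Nat) (acc : List Char), j < fuel →
    Nat.toDigitsCore 2 fuel j acc = (if j = 0 then ['0'] else goBin j) ++ acc := by
  induction fuel with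
  | zero => intro j acc h; omega
  | succ f ih =>
    intro j acc h
    rw [Nat.toDigitsCore]
    by_cases h0 : j / 2 = 0
    · have hj : j ≤ 1 := by omega
      have h1 : goBin 1 = ['1'] := by
        rw [goBin_pos 1 one_pos]
        have : goBin (1 / 2) = [] := by simp [goBin]
        rw [this]
        decide
      have d0 : Nat.digitChar 0 = '0' := by decide
      have d1 : Nat.digitChar 1 = '1' := by decide
      interval_cases j
      · simp [h0, d0]
      · rw [if_pos h0, if_neg (by omega : ¬ (1:Nat) = 0), h1]
        norm_num [d1]
    · rw [if_neg h0, ih (j / 2) _ (by omega)]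
      rw [if_neg h0, if_neg (show ¬ j = 0 by omega), goBin_pos j (by omega)]
      simp

theorem toDigits_eq (j : Nat) :
    Nat.toDigits 2 j = (if j = 0 then ['0'] else goBin j) := by
  rw [Nat.toDigits, toDigitsCore_eq (j + 1) j [] (by omega), List.append_nil]

theorem goBin_len : ∀ (w j : Nat), j < 2 ^ w → (goBin j).length ≤ w := by
  intro w
  induction w with
  | zero => intro j h; interval_cases j; simp [goBin]
  | succ w ih =>
    intro j h
    rcases Nat.eq_zero_or_pos j with rfl | hj
    · simp [goBin]
    · rw [goBin_pos j hj]
      have : (goBin (j / 2)).length ≤ w := ih _ (by omega)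
      simp only [List.length_append, List.length_cons, List.length_nil]
      omega

theorem goBin_two_pow_add : ∀ (w j : Nat), j < 2 ^ w →
    goBin (2 ^ w + j) = '1' :: pvRjust0 (goBin j) w := by
  intro w
  induction w with
  | zero =>
    intro j h
    interval_cases j
    rw [show 2 ^ 0 + 0 = 1 from rfl, goBin_pos 1 one_pos]
    simp [goBin, pvRjust0]
    decide
  | succ w ih =>
    intro j h
    have h2 : 2 ^ (w + 1) = 2 * 2 ^ w := by ring
    rw [goBin_pos (2 ^ (w + 1) + j) (by positivity)]
    have hd : (2 ^ (w + 1) + j) / 2 = 2 ^ w + j / 2 := by omega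
    have hm : (2 ^ (w + 1) + j) % 2 = j % 2 := by omega
    rw [hd, hm, ih (j / 2) (by omega)]
    rcases Nat.eq_zero_or_pos j with rfl | hj
    · have e0 : goBin 0 = [] := by simp [goBin]
      have d0 : Nat.digitChar 0 = '0' := by decide
      simp only [Nat.zero_div, Nat.zero_mod, e0, d0, pvRjust0, List.length_nil, Nat.sub_zero,
        List.append_nil, List.cons_append]
      rw [List.replicate_succ']
    · rw [goBin_pos j hj]
      simp only [pvRjust0, List.length_append, List.length_cons, List.length_nil]
      have hl : (goBin (j / 2)).length ≤ w := goBin_len w _ (by omega)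
      simp only [List.cons_append, List.append_assoc]
      rw [show w + 1 - ((goBin (j / 2)).length + 1) = w - (goBin (j / 2)).length from by omega]

theorem length_pvRjust0 (cs : List Char) (w : Nat) (h : cs.length ≤ w) :
    (pvRjust0 cs w).length = w := by
  simp [pvRjust0]
  omega

theorem pvRjust0_succ (cs : List Char) (w : Nat) (h : cs.length ≤ w) :
    pvRjust0 cs (w + 1) = '0' :: pvRjust0 cs w := by
  simp only [pvRjust0]
  rw [show w + 1 - cs.length = (w - cs.length) + 1 from by omega, List.replicate_succ]
  simp

theorem pvRjust0_self {w : Nat} (cs : List Char) (h : w ≤ cs.length) : pvRjust0 cs w = cs := by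
  simp [pvRjust0, Nat.sub_eq_zero_of_le h]

theorem bin_map : ∀ (w : Nat), 1 ≤ w →
    (List.range (2 ^ w)).map (fun k => pvRjust0 (goBin k) w) = all_bin (w : Int) := by
  intro w
  induction w with
  | zero => omega
  | succ w ih =>
    intro _
    rcases Nat.eq_zero_or_pos w with rfl | hw
    · have h1 : goBin 1 = ['1'] := by
        rw [goBin_pos 1 one_pos]
        have : goBin (1 / 2) = [] := by simp [goBin]
        rw [this]; decide
      have h0 : goBin 0 = [] := by simp [goBin]
      rw [show (2:Nat) ^ 1 = 2 from rfl, show List.range 2 = [0, 1] from rfl]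
      rw [all_bin, if_neg (by omega)]
      rw [all_bin, if_pos (by omega)]
      simp [h0, h1, pvRjust0]
    · have hsplit : (2:Nat) ^ (w + 1) = 2 ^ w + 2 ^ w := by ring
      rw [hsplit, List.range_add, List.map_append, List.map_map]
      have hfst : (List.range (2 ^ w)).map (fun k => pvRjust0 (goBin k) (w + 1))
          = (List.range (2 ^ w)).map (fun k => '0' :: pvRjust0 (goBin k) w) := by
        apply List.map_eq_map_iff.mpr
        intro k hk
        exact pvRjust0_succ _ _ (goBin_len w k (List.mem_range.mp hk))
      have hsnd : (List.range (2 ^ w)).map ((fun k => pvRjust0 (goBin k) (w + 1)) ∘ (2 ^ w + ·))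
          = (List.range (2 ^ w)).map (fun k => '1' :: pvRjust0 (goBin k) w) := by
        apply List.map_eq_map_iff.mpr
        intro k hk
        have hk' := List.mem_range.mp hk
        simp only [Function.comp]
        rw [goBin_two_pow_add w k hk']
        exact pvRjust0_self _ (by simp [length_pvRjust0 _ _ (goBin_len w k hk')])
      rw [hfst, hsnd]
      push_cast
      rw [all_bin, if_neg (by omega)]
      have h1 : ((w:Int) + 1 - 1) = (w:Int) := by ring
      rw [h1, ← ih hw]
      simp [List.map_map, Function.comp_def]

theorem pvRjust0_zero_char (w : Nat) (h : 1 ≤ w) : pvRjust0 ['0'] w = pvRjust0 [] w := by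
  simp only [pvRjust0, List.length_cons, List.length_nil, Nat.sub_zero, List.append_nil]
  rw [show w = (w - 1) + 1 from by omega, List.replicate_succ']
  simp

theorem bin_eq (n : Int) : yield_all_binary n = all_bin n := by
  by_cases hn : n > 0
  · obtain ⟨w, rfl⟩ : ∃ w : Nat, n = (w : Int) := ⟨n.toNat, by omega⟩
    have hw : 1 ≤ w := by exact_mod_cast hn
    rw [yield_all_binary, if_pos hn, PySem.List.pyRange_one]
    have ht : (((2:Int) ^ (w:Int).toNat) - 0).toNat = 2 ^ w := by
      simp only [Int.toNat_natCast, Int.sub_zero]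
      rw [show ((2:Int) ^ w) = ((2 ^ w : Nat) : Int) from by push_cast; ring]
      exact Int.toNat_natCast _
    rw [ht, List.map_map]
    rw [← bin_map w hw]
    apply List.map_eq_map_iff.mpr
    intro k hk
    simp only [Function.comp, zero_add]
    have hb : PySem.Int.toBinChars0b ((k:Nat) : Int) = '0' :: 'b' :: Nat.toDigits 2 k := by
      simp [PySem.Int.toBinChars0b]
    rw [hb, PySem.List.slice_from _ (by norm_num : (0:Int) ≤ (2:Int))]
    rw [show ((2:Int)).toNat = 2 from rfl]
    simp only [List.drop_succ_cons, List.drop_zero]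
    rw [toDigits_eq k]
    have : (w:Int).toNat = w := by omega
    rw [this]
    rcases Nat.eq_zero_or_pos k with rfl | hk0
    · rw [if_pos rfl]
      have h0 : goBin 0 = [] := by simp [goBin]
      rw [h0, pvRjust0_zero_char w hw]
    · rw [if_neg (by omega)]
  · rw [yield_all_binary, if_neg hn, all_bin, if_pos (by omega)]

theorem floordiv_cast_two (m : Nat) : PySem.Int.floordiv ((m : Nat) : Int) 2 = ((m / 2 : Nat) : Int) := by
  exact_mod_cast PySem.Int.floordiv_natCast m 2

theorem gen_palindrome_shape (m : Nat) :
    gen_palindrome (m : Int) =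
      (all_bin (((m + 1) / 2 : Nat) : Int)).map
        (fun y => y ++ (y.take (m / 2)).reverse) := by
  rw [gen_palindrome]
  have h1 : ((m : Int) + 1) = (((m + 1 : Nat)) : Int) := by push_cast; ring
  rw [h1, floordiv_cast_two (m + 1), floordiv_cast_two m, bin_eq]
  apply List.map_eq_map_iff.mpr
  intro y _
  rw [PySem.List.slice_to_natCast]

theorem pal_eq_nat : ∀ (m : Nat), gen_palindrome (m : Int) = pals (m : Int) := by
  intro m
  induction m using Nat.strong_induction_on with
  | _ m ih =>
    match m with
    | 0 =>
      have hA : gen_palindrome ((0 : Nat) : Int) = [[]] := by decide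
      rw [hA, pals]
      simp
    | 1 =>
      have hA : gen_palindrome ((1 : Nat) : Int) = [['0'], ['1']] := by decide
      rw [hA, pals]
      norm_num
    | (m + 2) =>
      rw [gen_palindrome_shape (m + 2)]
      have e1 : (m + 2 + 1) / 2 = (m + 1) / 2 + 1 := by omega
      have e2 : (m + 2) / 2 = m / 2 + 1 := by omega
      rw [e1, e2]
      rw [all_bin, if_neg (by push_cast; omega)]
      have e3 : ((((m + 1) / 2 + 1 : Nat)) : Int) - 1 = (((m + 1) / 2 : Nat) : Int) := by push_cast; ring
      rw [e3]
      rw [pals, if_neg (by push_cast; omega), if_neg (by push_cast; omega)]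
      have e4 : (((m + 2 : Nat)) : Int) - 2 = ((m : Nat) : Int) := by push_cast; ring
      rw [e4, ← ih m (by omega), gen_palindrome_shape m]
      simp only [List.flatMap_cons, List.flatMap_nil, List.append_nil, List.map_append,
        List.map_map]
      congr 1
      · apply List.map_eq_map_iff.mpr
        intro y _
        simp only [Function.comp]
        rw [List.take_succ_cons, List.reverse_cons]
        simp [List.append_assoc]
      · apply List.map_eq_map_iff.mpr
        intro y _
        simp only [Function.comp]
        rw [List.take_succ_cons, List.reverse_cons]
        simp [List.append_assoc]

theorem pal_eq_int (i : Int) (h : 0 ≤ i) : gen_palindrome i = pals i := by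
  obtain ⟨m, rfl⟩ := Int.eq_ofNat_of_zero_le h
  exact pal_eq_nat m

theorem set_foldl_update {α β : Type} [BEq α] (l : List β) (g : β → List α) (s : PySem.Set α) :
    l.foldl (fun o b => PySem.Set.update o (g b)) s = PySem.Set.update s (l.flatMap g) := by
  induction l generalizing s with
  | nil => simp [PySem.Set.update_nil]
  | cons b t ihb => simp [List.flatMap_cons, PySem.Set.update_append, ihb]

/-- The padded strings produced for one palindrome `x` (B's four inner generators). -/
def padlist (n i : Int) (x : List Char) : List (List Char) :=
  (PySem.List.pyRange 0 (n - i + 1)).flatMap (fun pl =>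
    (PySem.List.pyRange 0 (n - i - pl + 1)).flatMap (fun sl =>
      (all_bin pl).flatMap (fun p =>
        (all_bin sl).map (fun s => p ++ x ++ s))))

theorem all_bin_zero : all_bin 0 = [[]] := by rw [all_bin]; norm_num

theorem update_padlist_cons (n i : Int) (h : i ≤ n) (x : List Char) (o : PySem.Set (List Char)) :
    PySem.Set.update o (x :: padlist n i x) = PySem.Set.update o (padlist n i x) := by
  rw [padlist, PySem.List.pyRange_one_cons (by omega : (0:Int) < n - i + 1), List.flatMap_cons,
    PySem.List.pyRange_one_cons (by omega : (0:Int) < n - i - 0 + 1), List.flatMap_cons,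
    all_bin_zero]
  simp only [List.flatMap_cons, List.flatMap_nil, List.map_cons, List.map_nil,
    List.nil_append, List.append_nil, List.cons_append, List.append_assoc]
  rw [PySem.Set.update_cons, PySem.Set.update_cons, PySem.Set.update_cons,
    PySem.Set.add_of_mem (((PySem.Set.mem_add o x x).mpr (Or.inr rfl)))]

theorem xbodyA (n i : Int) (x : List Char) (o : PySem.Set (List Char)) :
    ((PySem.List.pyRange 0 (n - i + 1)).foldl (fun o np =>
      (PySem.List.pyRange 0 (n - i - np + 1)).foldl (fun o ns =>
        (all_bin np).foldl (fun o p =>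
          (all_bin ns).foldl (fun o s => o.add (p ++ x ++ s)) o) o) o) o)
      = PySem.Set.update o (padlist n i x) := by
  simp only [← PySem.Set.update_map_eq_foldl_add, set_foldl_update, padlist]

/-- A's contribution for one length `i`: each palindrome, then its padded strings. -/
def chunkA (n i : Int) : List (List Char) :=
  (pals i).flatMap (fun x => x :: padlist n i x)

/-- B's contribution for one length `i`: just the padded strings (the bare `x` is their head). -/
def chunkB (n i : Int) : List (List Char) :=
  (pals i).flatMap (fun x => padlist n i x)

theorem chunk_eq (n i : Int) (h : i ≤ n) (o : PySem.Set (List Char)) :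
    PySem.Set.update o (chunkA n i) = PySem.Set.update o (chunkB n i) := by
  rw [chunkA, chunkB]
  generalize (pals i) = P
  induction P generalizing o with
  | nil => rfl
  | cons x P ihp =>
    simp only [List.flatMap_cons, PySem.Set.update_append]
    rw [update_padlist_cons n i h x o]
    exact ihp _

theorem ibody (n i : Int) (h0 : 0 ≤ i) (o : PySem.Set (List Char)) :
    (gen_palindrome i).foldl (fun o x =>
      (PySem.List.pyRange 0 ((n - i) + 1)).foldl (fun o np =>
        (PySem.List.pyRange 0 ((n - i) - np + 1)).foldl (fun o ns =>
          (yield_all_binary np).foldl (fun o p =>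
            (yield_all_binary ns).foldl (fun o s => o.add (p ++ x ++ s)) o) o) o) (o.add x)) o
      = PySem.Set.update o (chunkA n i) := by
  rw [pal_eq_int i h0]
  simp only [bin_eq]
  rw [PySem.List.foldl_congr_mem (pals i) _
    (fun o x => PySem.Set.update o (x :: padlist n i x)) o
    (fun acc x _ => by rw [xbodyA, ← PySem.Set.update_cons])]
  rw [set_foldl_update]
  rfl

theorem chunks_eq (n : Int) (l : List Int) (hl : ∀ i ∈ l, i ≤ n) (o : PySem.Set (List Char)) :
    PySem.Set.update o (l.flatMap (chunkA n)) = PySem.Set.update o (l.flatMap (chunkB n)) := by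
  induction l generalizing o with
  | nil => rfl
  | cons i t iht =>
    simp only [List.flatMap_cons, PySem.Set.update_append]
    rw [chunk_eq n i (hl i List.mem_cons_self) o]
    exact iht (fun j hj => hl j (List.mem_cons_of_mem _ hj)) _

theorem gen_strings_eq_alt (n : Int) : gen_strings n = gen_strings_alt n := by
  unfold gen_strings gen_strings_alt
  rw [PySem.List.foldl_congr_mem (PySem.List.pyRange 5 (n + 1)) _
    (fun o i => PySem.Set.update o (chunkA n i)) PySem.Set.empty
    (fun acc i hi => by
      have h := PySem.List.mem_pyRange_one.mp hi
      exact ibody n i (by omega) acc)]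
  rw [set_foldl_update, ← PySem.Set.update_empty]
  rw [chunks_eq n _ (fun i hi => by have := PySem.List.mem_pyRange_one.mp hi; omega)]
  rfl

-- ===== VERDICT (by name: the statement is the Claim_ definition above) =====
theorem gen_strings_spec : Claim_equal_gen_strings := by
  intro n _
  unfold Spec_gen_strings
  exact gen_strings_eq_alt n
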